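-- pv_equiv track=rewrite | github.com/JamesTadleyGreen/advent-of-code | 2022/Day 1/main.py | text_to_list
-- ===== SOURCE A (Python) =====
-- def text_to_list(text: str):
--     lines = text.split("\n")
--     output = []
--     tmp = []
--     for i in lines:
--         if i == "":
--             output.append(tmp)
--             tmp = []
--         else:
--             tmp.append(int(i))
--     output.append(tmp)
--     return output
-- ===== SOURCE B (Python) =====
-- def text_to_list(text: str):
--     lines = text.split("\n")
--
--     def groups(ls):
--         if "" in ls:
--             k = ls.index("")
--             return [[int(x) for x in ls[:k]]] + groups(ls[k + 1:])
--         return [[int(x) for x in ls]]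
--
--     return groups(lines)
-- ===== Notes on version B (the rewrite author's own statement) =====
-- stated objective: alternative
-- what changed: A scans once with an accumulator flushed at each blank line; B recursively splits the line list at the first blank separator (list.index) and slices, building one group per segment with no accumulator state.
import Mathlib
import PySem

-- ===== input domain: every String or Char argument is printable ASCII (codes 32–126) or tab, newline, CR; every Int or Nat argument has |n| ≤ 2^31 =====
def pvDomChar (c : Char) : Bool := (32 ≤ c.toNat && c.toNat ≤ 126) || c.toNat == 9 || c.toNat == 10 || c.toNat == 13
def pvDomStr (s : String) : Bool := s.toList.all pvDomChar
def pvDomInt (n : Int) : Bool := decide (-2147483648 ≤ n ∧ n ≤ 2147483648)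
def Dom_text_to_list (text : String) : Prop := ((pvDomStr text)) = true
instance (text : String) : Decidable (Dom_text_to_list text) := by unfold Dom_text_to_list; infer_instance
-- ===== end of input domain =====

-- B replaces A's accumulator loop by recursion that splits the line list at the first blank line; alternative decomposition, same cost.

-- int(i); total helper, exact on Pre_ (where ofStr? is some)
def pvInt (s : String) : Int := (PySem.Int.ofStr? s).getD 0

-- ===== PORT A =====
def text_to_list (text : String) : List (List Int) :=
  let lines := (PySem.Str.split? text "\n").getD []
  let st := lines.foldl
    (fun (st : List (List Int) × List Int) i =>
      if i = "" then (st.1 ++ [st.2], ([] : List Int))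
      else (st.1, st.2 ++ [pvInt i]))
    (([] : List (List Int)), ([] : List Int))
  st.1 ++ [st.2]

-- ===== PORT B =====
-- groups(ls): split at the first "" (list.index) and recurse on the remainder
def altGroups (ls : List String) : List (List Int) :=
  match h : PySem.List.index? ls "" with
  | none => [ls.map pvInt]
  | some k => (ls.take k).map pvInt :: altGroups (ls.drop (k + 1))
termination_by ls.length
decreasing_by
  obtain ⟨hk, -, -⟩ := PySem.List.getElem_of_index?_eq_some h
  simp only [List.length_drop]; omega

def text_to_list_alt (text : String) : List (List Int) :=
  altGroups ((PySem.Str.split? text "\n").getD [])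

-- ===== PRECONDITION & SPEC =====
-- Pre_ excludes exactly the inputs where Python's int(i) raises ValueError on some non-blank line.
def Pre_text_to_list (text : String) : Prop :=
  ∀ l ∈ (PySem.Str.split? text "\n").getD [], l ≠ "" → (PySem.Int.ofStr? l).isSome = true
instance (text : String) : Decidable (Pre_text_to_list text) := by unfold Pre_text_to_list; infer_instance

def pvWitness_text_to_list : String := "1\n2\n\n3"

def Spec_text_to_list (text : String) (out : List (List Int)) : Prop := out = text_to_list_alt text
instance (text : String) (out : List (List Int)) : Decidable (Spec_text_to_list text out) := by unfold Spec_text_to_list; infer_instance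

-- ===== CLAIM (what is proved, stated in full; the proofs are below) =====
def Claim_equal_text_to_list : Prop := ∀ (text : String), Dom_text_to_list text → Pre_text_to_list text → Spec_text_to_list text (text_to_list text)

-- ===== LEMMAS AND PROOFS =====

/-- apply f to the head group, keep the rest -/
def mapHead (f : List Int → List Int) : List (List Int) → List (List Int)
  | [] => []
  | g :: r => f g :: r

theorem altGroups_of_none (ls : List String) (h : PySem.List.index? ls "" = none) :
    altGroups ls = [ls.map pvInt] := by
  rw [altGroups]; split
  · rfl
  · rename_i k heq; rw [h] at heq; cases heq

theorem altGroups_of_some (ls : List String) (k : Nat)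
    (h : PySem.List.index? ls "" = some k) :
    altGroups ls = (ls.take k).map pvInt :: altGroups (ls.drop (k + 1)) := by
  rw [altGroups]; split
  · rename_i heq; rw [h] at heq; cases heq
  · rename_i k' heq; rw [h] at heq; injection heq with hk; subst hk; rfl

theorem altGroups_nil : altGroups [] = [[]] := by
  rw [altGroups_of_none] <;> simp [PySem.List.index?_eq_idxOf?]

theorem altGroups_cons_blank (r : List String) :
    altGroups ("" :: r) = [] :: altGroups r := by
  rw [altGroups_of_some ("" :: r) 0 (PySem.List.index?_cons_self _ _)]
  simp

theorem altGroups_cons (l : String) (r : List String) (h : l ≠ "") :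
    altGroups (l :: r) = mapHead (pvInt l :: ·) (altGroups r) := by
  cases hr : PySem.List.index? r "" with
  | none =>
    rw [altGroups_of_none (l :: r)
      (by rw [PySem.List.index?_cons_of_ne _ h, hr]; rfl)]
    rw [altGroups_of_none r hr]
    simp [mapHead]
  | some k =>
    rw [altGroups_of_some (l :: r) (k + 1)
      (by rw [PySem.List.index?_cons_of_ne _ h, hr]; rfl)]
    rw [altGroups_of_some r k hr]
    simp [mapHead]

theorem mapHead_nil_append (x : List (List Int)) :
    mapHead (fun g => [] ++ g) x = x := by
  cases x <;> simp [mapHead]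

theorem loop_eq (ls : List String) (out : List (List Int)) (tmp : List Int) :
    (ls.foldl
      (fun (st : List (List Int) × List Int) i =>
        if i = "" then (st.1 ++ [st.2], ([] : List Int))
        else (st.1, st.2 ++ [pvInt i])) (out, tmp)).1
    ++ [(ls.foldl
      (fun (st : List (List Int) × List Int) i =>
        if i = "" then (st.1 ++ [st.2], ([] : List Int))
        else (st.1, st.2 ++ [pvInt i])) (out, tmp)).2]
    = out ++ mapHead (fun g => tmp ++ g) (altGroups ls) := by
  induction ls generalizing out tmp with
  | nil => simp [altGroups_nil, mapHead]
  | cons l r ih =>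
    by_cases hl : l = ""
    · subst hl
      simp only [List.foldl_cons, reduceIte]
      rw [ih, altGroups_cons_blank, mapHead_nil_append]
      simp [mapHead]
    · simp only [List.foldl_cons, if_neg hl]
      rw [ih, altGroups_cons l r hl]
      congr 1
      cases altGroups r <;> simp [mapHead]

-- ===== VERDICT (by name: the statement is the Claim_ definition above) =====
theorem text_to_list_spec : Claim_equal_text_to_list := by
  intro text _ _
  show text_to_list text = text_to_list_alt text
  unfold text_to_list text_to_list_alt
  rw [loop_eq, mapHead_nil_append]
  simp
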